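-- pv_equiv track=rewrite | github.com/D-GarciaS/AprendizajeMaquina | AlgoHuff.py | Crear_Arreglo
-- ===== SOURCE A (Python) =====
-- def Crear_Arreglo(cadena):
--     nuevo_tabla_nodos = {}
--     for c in cadena:
--         if c in nuevo_tabla_nodos:
--             nuevo_tabla_nodos[c] += 1
--         else:
--             nuevo_tabla_nodos[c] = 1
--
--     nuevo_arreglo_nodos = []
--     for caracter in nuevo_tabla_nodos.items():
--         nuevo_nodo = (caracter[0], caracter[0], caracter[1])
--         nuevo_arreglo_nodos.append(nuevo_nodo)
--
--     return nuevo_arreglo_nodos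
-- ===== SOURCE B (Python) =====
-- def Crear_Arreglo(cadena):
--     # Recursive partition: peel off the first character, count its occurrences,
--     # drop all of them, and recurse on what is left. No frequency dict is kept.
--     def go(chars):
--         if not chars:
--             return []
--         c = chars[0]
--         rest = chars[1:]
--         same = 1
--         others = []
--         for x in rest:
--             if x == c:
--                 same += 1
--             else:
--                 others.append(x)
--         return [(c, c, same)] + go(others)
--     return go(list(cadena))
-- ===== Notes on version B (the rewrite author's own statement) =====
-- stated objective: alternative
-- what changed: Replaced the running frequency dict plus items() rebuild by a recursive partition: take the first character, count and remove all its occurrences in one sweep, then recurse on the remaining characters.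
import Mathlib
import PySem

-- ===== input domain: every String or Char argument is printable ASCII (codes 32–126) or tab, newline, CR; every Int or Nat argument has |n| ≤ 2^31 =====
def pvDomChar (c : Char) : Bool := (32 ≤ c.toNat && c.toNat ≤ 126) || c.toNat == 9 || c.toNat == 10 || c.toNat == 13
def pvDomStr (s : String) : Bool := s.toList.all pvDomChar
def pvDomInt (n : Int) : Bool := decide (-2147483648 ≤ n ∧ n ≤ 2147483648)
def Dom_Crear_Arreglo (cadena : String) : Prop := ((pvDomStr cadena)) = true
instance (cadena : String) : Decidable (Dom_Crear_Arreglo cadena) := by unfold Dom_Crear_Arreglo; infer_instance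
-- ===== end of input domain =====

-- B replaces A's running frequency dict + items() rebuild by a recursive partition (peel first char, count-and-drop its occurrences in one sweep, recurse); an alternative decomposition, not claimed faster.

-- ===== PORT A =====
def Crear_Arreglo (cadena : String) : List (String × String × Int) :=
  let tabla : PySem.Dict Char Int :=
    cadena.toList.foldl
      (fun d c => if d.contains c then d.insert c (d.getD c 0 + 1) else d.insert c 1)
      PySem.Dict.empty
  tabla.items.foldl
    (fun acc p => acc ++ [(String.singleton p.1, String.singleton p.1, p.2)]) []

-- ===== PORT B =====
-- Source B's inner loop over `rest`: one sweep accumulating (same, others).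
def crearStep (c : Char) (rest : List Char) : Int × List Char :=
  rest.foldl (fun (p : Int × List Char) x =>
      if x == c then (p.1 + 1, p.2) else (p.1, p.2 ++ [x])) (1, [])

-- closed form of that sweep; cited by name in the port's decreasing_by, so it stays above the port
theorem crearStep_spec (c : Char) (rest : List Char) :
    crearStep c rest = (1 + (rest.count c : Int), rest.filter (fun x => !(x == c))) := by
  suffices h : ∀ (t : List Char) (n : Int) (acc : List Char),
      t.foldl (fun (p : Int × List Char) x =>
          if x == c then (p.1 + 1, p.2) else (p.1, p.2 ++ [x])) (n, acc)
        = (n + (t.count c : Int), acc ++ t.filter (fun x => !(x == c))) by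
    simpa [crearStep] using h rest 1 []
  intro t
  induction t with
  | nil => intro n acc; simp
  | cons h t ih =>
    intro n acc
    by_cases hc : h = c
    · subst hc
      simp only [List.foldl_cons, beq_self_eq_true, if_pos, ih]
      simp
      ring
    · have hb : (h == c) = false := by simpa using hc
      simp only [List.foldl_cons, hb, Bool.false_eq_true, if_false, ih]
      simp [hb, List.count_cons]

def crearGo : List Char → List (String × String × Int)
  | [] => []
  | c :: rest =>
      [(String.singleton c, String.singleton c, (crearStep c rest).1)]
        ++ crearGo (crearStep c rest).2
termination_by l => l.length
decreasing_by
  simp only [crearStep_spec, List.length_cons]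
  exact Nat.lt_succ_of_le (List.length_filter_le _ _)

def Crear_Arreglo_alt (cadena : String) : List (String × String × Int) :=
  crearGo cadena.toList

-- ===== PRECONDITION & SPEC =====
def Spec_Crear_Arreglo (cadena : String) (out : List (String × String × Int)) : Prop := out = Crear_Arreglo_alt cadena
instance (cadena : String) (out : List (String × String × Int)) : Decidable (Spec_Crear_Arreglo cadena out) := by unfold Spec_Crear_Arreglo; infer_instance

-- ===== CLAIM (what is proved, stated in full; the proofs are below) =====
def Claim_equal_Crear_Arreglo : Prop := ∀ (cadena : String), Dom_Crear_Arreglo cadena → Spec_Crear_Arreglo cadena (Crear_Arreglo cadena)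

-- ===== LEMMAS AND PROOFS =====

-- A's counting step (the if/else) is exactly the counter step: when c is absent, getD gives 0.
lemma stepA_eq_counter_step :
    (fun (d : PySem.Dict Char Int) (c : Char) =>
        if d.contains c then d.insert c (d.getD c 0 + 1) else d.insert c 1)
      = (fun (d : PySem.Dict Char Int) (c : Char) => d.insert c (d.getD c 0 + 1)) := by
  funext d c
  by_cases h : d.contains c = true
  · simp [h]
  · have h0 : d.getD c 0 = 0 := by
      have := PySem.Dict.get?_eq_none_iff_contains (d := d) (k := c)
      simp [PySem.Dict.getD, this.mpr (by simpa using h)]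
    simp [h, h0]

-- Set.add folding ignores elements already in the accumulator.
lemma foldl_add_skip (c : Char) : ∀ (t acc : List Char), c ∈ acc →
    t.foldl PySem.Set.add acc = (t.filter (fun x => !(x == c))).foldl PySem.Set.add acc := by
  intro t
  induction t with
  | nil => intro acc _; simp
  | cons h t ih =>
    intro acc hc
    by_cases hh : h = c
    · subst hh
      have : PySem.Set.add acc h = acc := by
        simp [PySem.Set.add, PySem.Set.contains, hc]
      simp [this, ih acc hc]
    · have hmem : c ∈ PySem.Set.add acc h := by
        simp [PySem.Set.add, PySem.Set.contains]
        split <;> simp [hc]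
      simp [hh, ih _ hmem]

-- A fixed head not occurring in the fold's input is carried through Set.add folding.
lemma foldl_add_cons_head (c : Char) : ∀ (t acc : List Char), c ∉ t →
    t.foldl PySem.Set.add (c :: acc) = c :: t.foldl PySem.Set.add acc := by
  intro t
  induction t with
  | nil => intro acc _; simp
  | cons h t ih =>
    intro acc hc
    have hh : ¬ (h = c) := fun e => hc (by simp [e])
    have hstep : PySem.Set.add (c :: acc) h = c :: PySem.Set.add acc h := by
      simp [PySem.Set.add, PySem.Set.contains]
      split <;> simp <;> tauto
    rw [List.foldl_cons, hstep, List.foldl_cons,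
      ih _ (fun hm => hc (List.mem_cons_of_mem _ hm))]

-- First-occurrence dedup unrolls as: keep the head, recurse on the rest with the head filtered out.
lemma ofList_cons_filter (c : Char) (t : List Char) :
    PySem.Set.ofList (c :: t) = c :: PySem.Set.ofList (t.filter (fun x => !(x == c))) := by
  have h1 : PySem.Set.add PySem.Set.empty c = [c] := by
    simp [PySem.Set.add, PySem.Set.contains, PySem.Set.empty]
  have h2 : c ∉ t.filter (fun x => !(x == c)) := by
    intro hm
    simp [List.mem_filter] at hm
  simp only [PySem.Set.ofList, List.foldl_cons, h1]
  rw [foldl_add_skip c t [c] (by simp)]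
  exact foldl_add_cons_head c _ PySem.Set.empty h2

-- crearGo lists, for each distinct character in first-occurrence order, its count in the whole list.
lemma crearGo_eq_map_aux : ∀ (n : Nat) (l : List Char), l.length ≤ n →
    crearGo l = (PySem.Set.ofList l).map
      (fun c => (String.singleton c, String.singleton c, (l.count c : Int))) := by
  intro n
  induction n with
  | zero =>
    intro l hl
    have : l = [] := List.eq_nil_of_length_eq_zero (Nat.le_zero.mp hl)
    subst this
    simp [crearGo, PySem.Set.ofList, PySem.Set.empty]
  | succ n ih =>
    intro l hl
    cases l with
    | nil => simp [crearGo, PySem.Set.ofList, PySem.Set.empty]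
    | cons c rest =>
      rw [crearGo, crearStep_spec]
      have hlen : (rest.filter (fun x => !(x == c))).length ≤ n :=
        le_trans (List.length_filter_le _ _) (by simpa using hl)
      rw [ih _ hlen, ofList_cons_filter]
      simp only [List.map_cons, List.singleton_append]
      congr 1
      · simp
        ring
      · apply List.map_congr_left
        intro x hx
        have hxf : x ∈ rest.filter (fun x => !(x == c)) := (PySem.Set.mem_ofList _ _).mp hx
        have hxc : ¬ (x = c) := by
          have := (List.mem_filter.mp hxf).2
          simpa using this
        congr 1
        rw [List.count_filter (by simpa using hxc), List.count_cons]
        simp [show (c == x) = false from by simpa using fun e => hxc e.symm]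

lemma crearGo_eq_map (l : List Char) :
    crearGo l = (PySem.Set.ofList l).map
      (fun c => (String.singleton c, String.singleton c, (l.count c : Int))) :=
  crearGo_eq_map_aux l.length l le_rfl

-- ===== VERDICT (by name: the statement is the Claim_ definition above) =====
theorem Crear_Arreglo_spec : Claim_equal_Crear_Arreglo := by
  intro cadena _
  unfold Spec_Crear_Arreglo Crear_Arreglo Crear_Arreglo_alt
  simp only [stepA_eq_counter_step, PySem.Dict.foldl_insert_getD_add_one_eq_counter,
    PySem.Dict.items_counter, PySem.List.foldl_append_singleton_eq_map, crearGo_eq_map]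
  simp [List.map_map, Function.comp]
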